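-- pv_equiv track=rewrite | github.com/Bolt259/bloodBender | bloodBath/data/processors.py | _get_lstm_column_order
-- ===== SOURCE A (Python) =====
-- from typing import List, Dict, Any, Optional, Tuple
--
-- def _get_lstm_column_order(columns) -> List[str]:
--     """
--     Define the standard column order for LSTM training
--
--     Args:
--         columns: Available columns
--
--     Returns:
--         List of column names in desired order
--     """
--     # Standard LSTM column order
--     standard_order = [
--         'timestamp',
--         'bg',
--         'basal_rate',
--         'bolus_dose',
--         'basal_delta',
--         'time_since_last_bolus',
--         'bg_slope_15min',
--         'bg_slope_30min',
--         'sin_time',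
--         'cos_time',
--         'mask_bg',
--         'mask_label'
--     ]
--
--     # Include only columns that exist
--     ordered_columns = [col for col in standard_order if col in columns]
--
--     # Add any remaining columns not in standard order
--     remaining_columns = [col for col in columns if col not in ordered_columns]
--     ordered_columns.extend(remaining_columns)
--
--     return ordered_columns
-- ===== SOURCE B (Python) =====
-- def _get_lstm_column_order(columns):
--     """Decorate-sort-undecorate: give each emitted column a numeric sort key
--     (its rank in the standard order, or len(standard)+position for extras)
--     in one pass over `columns`, then sort by key and strip the keys."""
--     standard_order = [
--         'timestamp',
--         'bg',
--         'basal_rate',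
--         'bolus_dose',
--         'basal_delta',
--         'time_since_last_bolus',
--         'bg_slope_15min',
--         'bg_slope_30min',
--         'sin_time',
--         'cos_time',
--         'mask_bg',
--         'mask_label',
--     ]
--     rank = {col: i for i, col in enumerate(standard_order)}
--     keyed = []
--     seen = set()
--     for i, col in enumerate(columns):
--         r = rank.get(col)
--         if r is None:
--             keyed.append((len(standard_order) + i, col))
--         elif col not in seen:
--             seen.add(col)
--             keyed.append((r, col))
--     keyed.sort(key=lambda t: t[0])
--     return [col for _, col in keyed]
-- ===== Notes on version B (the rewrite author's own statement) =====
-- stated objective: alternative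
-- what changed: Replaces A's two filter scans (standard_order filtered by membership in columns, then columns filtered by membership in the built list) with decorate-sort-undecorate: one pass over columns assigns each emitted column a numeric sort key (its rank from a prebuilt rank dict, or len(standard_order)+position for extras, skipping repeated standard columns via a seen-set), then the keyed pairs are sorted by key and the keys stripped.
import Mathlib
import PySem

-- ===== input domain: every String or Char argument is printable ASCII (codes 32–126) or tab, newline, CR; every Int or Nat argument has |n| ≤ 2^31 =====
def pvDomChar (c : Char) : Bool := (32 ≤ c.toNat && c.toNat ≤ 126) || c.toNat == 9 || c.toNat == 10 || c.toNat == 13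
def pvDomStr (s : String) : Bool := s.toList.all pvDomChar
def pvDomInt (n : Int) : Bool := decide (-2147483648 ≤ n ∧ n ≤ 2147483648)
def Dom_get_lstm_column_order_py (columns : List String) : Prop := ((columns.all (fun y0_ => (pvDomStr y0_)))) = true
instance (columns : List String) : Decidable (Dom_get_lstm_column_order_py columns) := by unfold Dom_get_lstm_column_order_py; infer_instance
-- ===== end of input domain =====

-- B replaces A's two filter scans by decorate-sort-undecorate: one pass over `columns`
-- assigns each emitted column a numeric sort key, then a key-sort and a strip (alternative algorithm).


-- the constant `standard_order` list, shared verbatim by both ports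
def pvStdOrder : List String :=
  ["timestamp", "bg", "basal_rate", "bolus_dose", "basal_delta",
   "time_since_last_bolus", "bg_slope_15min", "bg_slope_30min",
   "sin_time", "cos_time", "mask_bg", "mask_label"]

-- ===== PORT A =====
def get_lstm_column_order_py (columns : List String) : List String :=
  let standard_order := pvStdOrder
  let ordered_columns := standard_order.filter (fun col => columns.contains col)
  let remaining_columns := columns.filter (fun col => !(ordered_columns.contains col))
  ordered_columns ++ remaining_columns

-- ===== PORT B =====
-- rank = {col: i for i, col in enumerate(standard_order)}  (a constant dict)
def pvRank : PySem.Dict String Int :=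
  (PySem.List.enumerate pvStdOrder 0).foldl (fun d p => d.insert p.2 p.1) PySem.Dict.empty

-- one iteration of B's decorating loop (state = (seen, keyed), p = (i, col))
def pvAltStep (nstd : Int) (st : PySem.Set String × List (Int × String))
    (p : Int × String) : PySem.Set String × List (Int × String) :=
  match pvRank.get? p.2 with
  | none => (st.1, st.2 ++ [(nstd + p.1, p.2)])
  | some r =>
    if PySem.Set.contains st.1 p.2 then st
    else (PySem.Set.add st.1 p.2, st.2 ++ [(r, p.2)])

def get_lstm_column_order_py_alt (columns : List String) : List String :=
  let standard_order := pvStdOrder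
  let st := (PySem.List.enumerate columns 0).foldl
      (pvAltStep (standard_order.length : Int)) (PySem.Set.empty, [])
  (PySem.List.sorted st.2 (fun t => t.1) false).map (fun t => t.2)

-- ===== PRECONDITION & SPEC =====
def Spec_get_lstm_column_order_py (columns : List String) (out : List String) : Prop := out = get_lstm_column_order_py_alt columns
instance (columns : List String) (out : List String) : Decidable (Spec_get_lstm_column_order_py columns out) := by unfold Spec_get_lstm_column_order_py; infer_instance

-- ===== CLAIM (what is proved, stated in full; the proofs are below) =====
def Claim_equal_get_lstm_column_order_py : Prop := ∀ (columns : List String), Dom_get_lstm_column_order_py columns → Spec_get_lstm_column_order_py columns (get_lstm_column_order_py columns)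

-- ===== LEMMAS AND PROOFS =====

-- the standard entries B will emit, given the available columns and the seen-set
def pvSP (cols : List String) (s : PySem.Set String) : List (Int × String) :=
  (PySem.List.enumerate pvStdOrder 0).filter
    (fun p => cols.contains p.2 && !(PySem.Set.contains s p.2))

-- the extra entries B will emit from the enumerated suffix es
def pvEX (es : List (Int × String)) : List (Int × String) :=
  (es.filter (fun p => !(pvStdOrder.contains p.2))).map
    (fun p => ((pvStdOrder.length : Int) + p.1, p.2))

-- a dict built by inserting (value, key) pairs of an enumeration of a duplicate-free list
theorem pv_fold_insert_get? (l : List String) (hnd : l.Nodup) :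
    ∀ (s : Int) (d : PySem.Dict String Int) (c : String),
    ((PySem.List.enumerate l s).foldl (fun d p => d.insert p.2 p.1) d).get? c
      = match PySem.List.index? l c with
        | some k => some (s + (k : Int))
        | none => d.get? c := by
  induction l with
  | nil => intro s d c; simp [PySem.List.enumerate_nil]
  | cons x xs ih =>
    intro s d c
    rw [PySem.List.enumerate_cons]
    simp only [List.foldl_cons]
    rw [ih hnd.of_cons (s + 1) (d.insert x s) c]
    by_cases hcx : c = x
    · subst hcx
      have hnot : c ∉ xs := (List.nodup_cons.mp hnd).1
      rw [PySem.List.index?_cons_self]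
      rw [(PySem.List.index?_eq_none_iff xs c).mpr hnot]
      simp [PySem.Dict.get?_insert_self]
    · rw [PySem.List.index?_cons_of_ne (h := fun h => hcx h.symm)]
      cases hk : PySem.List.index? xs c with
      | none => simp only [Option.map_none]; exact PySem.Dict.get?_insert_of_ne d s hcx
      | some k => simp only [Option.map_some]; congr 1; push_cast; ring

theorem pv_rank_get? (c : String) :
    pvRank.get? c = (PySem.List.index? pvStdOrder c).map (fun k => (k : Int)) := by
  rw [pvRank, pv_fold_insert_get? pvStdOrder (by decide) 0 PySem.Dict.empty c]
  cases hk : PySem.List.index? pvStdOrder c with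
  | none => simp [PySem.Dict.get?_empty]
  | some k => simp

-- stripping the indices off a snd-filtered enumeration
theorem pv_map_snd_filter (P : String → Bool) (l : List String) :
    ∀ (s : Int),
    (((PySem.List.enumerate l s).filter (fun p => P p.2)).map (fun p => p.2)) = l.filter P := by
  induction l with
  | nil => intro s; simp [PySem.List.enumerate_nil]
  | cons x xs ih =>
    intro s
    rw [PySem.List.enumerate_cons]
    by_cases hx : P x
    · simp [hx, ih (s + 1)]
    · simp [hx, ih (s + 1)]

-- toggling a predicate at one distinguished element of a duplicate-free list of pairs
theorem pv_filter_split {α : Type} [DecidableEq α] (c : α) (P Q : α → Bool)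
    (hPc : P c = true) (hQc : Q c = false) (hag : ∀ y, y ≠ c → P y = Q y) :
    ∀ (l : List (Int × α)) (x : Int × α), l.Nodup → x ∈ l → x.2 = c →
    (∀ y ∈ l, y.2 = c → y = x) →
    (l.filter (fun p => P p.2)).Perm (x :: l.filter (fun p => Q p.2)) := by
  intro l
  induction l with
  | nil => intro x _ hx; exact absurd hx (List.not_mem_nil)
  | cons a t ih =>
    intro x hnd hx hxc huniq
    by_cases hac : a.2 = c
    · have hax : a = x := huniq a List.mem_cons_self hac
      subst hax
      have hat : a ∉ t := (List.nodup_cons.mp hnd).1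
      have hfilt : t.filter (fun p => P p.2) = t.filter (fun p => Q p.2) := by
        apply List.filter_congr
        intro y hy
        have hyc : y.2 ≠ c := fun h =>
          hat (by rw [huniq y (List.mem_cons_of_mem a hy) h] at hy; exact hy)
        simp [hag y.2 hyc]
      rw [List.filter_cons, List.filter_cons]
      simp only [hxc, hPc, hQc, if_pos, if_neg, Bool.false_eq_true, not_false_iff]
      rw [hfilt]
    · have hxt : x ∈ t := by
        rcases List.mem_cons.mp hx with h | h
        · exact absurd (h ▸ hxc) hac
        · exact h
      have hih := ih x (List.nodup_cons.mp hnd).2 hxt hxc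
        (fun y hy hyc => huniq y (List.mem_cons_of_mem a hy) hyc)
      have hPQa : P a.2 = Q a.2 := hag a.2 hac
      rw [List.filter_cons, List.filter_cons]
      cases hQ : Q a.2 with
      | true =>
        rw [hPQa, hQ]
        simp only [if_pos]
        exact ((hih.cons a).trans (List.Perm.swap x a _))
      | false =>
        rw [hPQa, hQ]
        simp only [Bool.false_eq_true, if_neg, not_false_iff]
        exact hih

-- facts about entries of the enumerated standard order
theorem pv_mem_enum_std (p : Int × String) (hp : p ∈ PySem.List.enumerate pvStdOrder 0) :
    p.2 ∈ pvStdOrder ∧ 0 ≤ p.1 ∧ p.1 < (pvStdOrder.length : Int) := by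
  rcases (PySem.List.mem_enumerate_iff _ _ _).mp hp with ⟨k, hk, hpk⟩
  subst hpk
  refine ⟨List.getElem_mem hk, by simp, ?_⟩
  simp; exact_mod_cast hk

theorem pv_nodup_enum_std : (PySem.List.enumerate pvStdOrder 0).Nodup := by
  have h := PySem.List.pairwise_lt_enumerate (xs := pvStdOrder) (s := 0)
  exact h.imp (fun {a b} hab => fun he => by rw [he] at hab; exact lt_irrefl _ hab)

-- the main loop invariant: the keyed list is a permutation of acc ++ standard part ++ extras
-- a seen-set extension is invisible to other strings
theorem pv_contains_add (s : PySem.Set String) (c y : String) (hcs : PySem.Set.contains s c = false)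
    (hy : y ≠ c) : PySem.Set.contains (PySem.Set.add s c) y = PySem.Set.contains s y := by
  have hnm : c ∉ s := by intro h; simp [h] at hcs
  rw [PySem.Set.add_of_not_mem hnm]
  simp
  exact fun h => absurd h hy

theorem pv_loop (es : List (Int × String)) :
    ∀ (s : PySem.Set String) (k : List (Int × String)),
    ((es.foldl (pvAltStep (pvStdOrder.length : Int)) (s, k)).2).Perm
      (k ++ pvSP (es.map (fun p => p.2)) s ++ pvEX es) := by
  induction es with
  | nil =>
    intro s k
    simp [pvSP, pvEX]
  | cons p rest ih =>
    intro s k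
    obtain ⟨i, c⟩ := p
    simp only [List.foldl_cons, List.map_cons, pvAltStep]
    rcases hr : pvRank.get? c with _ | r
    · -- c is not a standard column: it is decorated as an extra
      have hcstd : c ∉ pvStdOrder := by
        have := pv_rank_get? c
        rw [hr] at this
        cases hix : PySem.List.index? pvStdOrder c with
        | none => exact (PySem.List.index?_eq_none_iff _ _).mp hix
        | some k0 => rw [hix] at this; simp at this
      have hSP : pvSP (c :: rest.map (fun p => p.2)) s = pvSP (rest.map (fun p => p.2)) s := by
        unfold pvSP
        apply List.filter_congr
        intro q hq
        have hq2 : q.2 ≠ c := fun h => hcstd (h ▸ (pv_mem_enum_std q hq).1)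
        have hb : (q.2 == c) = false := beq_eq_false_iff_ne.mpr hq2
        simp [hb]
      have hEX : pvEX ((i, c) :: rest) = ((pvStdOrder.length : Int) + i, c) :: pvEX rest := by
        unfold pvEX
        rw [List.filter_cons]
        simp [hcstd]
      rw [hSP, hEX]
      refine (ih s (k ++ [((pvStdOrder.length : Int) + i, c)])).trans ?_
      simp only [List.append_assoc, List.singleton_append]
      exact List.Perm.append_left k List.perm_middle.symm
    · -- c is a standard column with rank r
      obtain ⟨k0, hix, hrk⟩ : ∃ k0, PySem.List.index? pvStdOrder c = some k0 ∧ r = (k0 : Int) := by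
        have := pv_rank_get? c
        rw [hr] at this
        cases hix : PySem.List.index? pvStdOrder c with
        | none => rw [hix] at this; simp at this
        | some k0 => rw [hix] at this; simp at this; exact ⟨k0, rfl, this⟩
      have hcmem : c ∈ pvStdOrder := (PySem.List.index?_isSome_iff _ _).mp (by rw [hix]; rfl)
      obtain ⟨hk0, hgetc, -⟩ := PySem.List.getElem_of_index?_eq_some hix
      have hEX : pvEX ((i, c) :: rest) = pvEX rest := by
        unfold pvEX
        rw [List.filter_cons]
        simp [hcmem]
      rcases hcs : PySem.Set.contains s c with _ | _
      · -- first occurrence of this standard column: emit (r, c) and mark it seen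
        have hx : ((k0 : Int), c) ∈ PySem.List.enumerate pvStdOrder 0 := by
          rw [PySem.List.mem_enumerate_iff]
          exact ⟨k0, hk0, by simp [hgetc]⟩
        have hsplit : (pvSP (c :: rest.map (fun p => p.2)) s).Perm
            (((k0 : Int), c) :: pvSP (rest.map (fun p => p.2)) (PySem.Set.add s c)) := by
          apply pv_filter_split c
            (fun y => (c :: rest.map (fun p => p.2)).contains y && !(PySem.Set.contains s y))
            (fun y => (rest.map (fun p => p.2)).contains y && !(PySem.Set.contains (PySem.Set.add s c) y))
          · rw [hcs]; simp
          · have hin : PySem.Set.contains (PySem.Set.add s c) c = true := by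
              simp [PySem.Set.mem_add]
            rw [hin]; simp
          · intro y hy
            rw [pv_contains_add s c y hcs hy]
            have hb : (y == c) = false := beq_eq_false_iff_ne.mpr hy
            simp [hb]
          · exact pv_nodup_enum_std
          · exact hx
          · rfl
          · intro y hy hyc
            rcases (PySem.List.mem_enumerate_iff _ _ _).mp hy with ⟨j, hj, hyj⟩
            have heq : pvStdOrder[j] = pvStdOrder[k0] := by
              rw [hgetc, ← hyc, hyj]
            have hjk : j = k0 := (List.Nodup.getElem_inj_iff (by decide)).mp heq
            subst hjk
            rw [hyj, hgetc]
            simp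
        rw [hEX]
        refine (ih (PySem.Set.add s c) (k ++ [(r, c)])).trans ?_
        rw [hrk]
        refine List.Perm.symm ?_
        refine (List.Perm.append_right (pvEX rest) (List.Perm.append_left k hsplit)).trans ?_
        simp only [List.append_assoc, List.cons_append]
        exact List.Perm.refl _
      · -- a repeated standard column is skipped
        have hSP : pvSP (c :: rest.map (fun p => p.2)) s = pvSP (rest.map (fun p => p.2)) s := by
          unfold pvSP
          apply List.filter_congr
          intro q hq
          by_cases hq2 : q.2 = c
          · rw [hq2, hcs]; simp
          · have hb : (q.2 == c) = false := beq_eq_false_iff_ne.mpr hq2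
            simp [hb]
        rw [hSP, hEX]
        exact ih s k

-- ===== VERDICT (by name: the statement is the Claim_ definition above) =====
theorem get_lstm_column_order_py_spec : Claim_equal_get_lstm_column_order_py := by
  intro columns _
  show get_lstm_column_order_py columns = get_lstm_column_order_py_alt columns
  simp only [get_lstm_column_order_py, get_lstm_column_order_py_alt]
  have hperm := pv_loop (PySem.List.enumerate columns 0) PySem.Set.empty []
  rw [PySem.List.map_snd_enumerate, List.nil_append] at hperm
  -- the decorated target is strictly increasing in its keys
  have hpair : (pvSP columns PySem.Set.empty ++ pvEX (PySem.List.enumerate columns 0)).Pairwise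
      (fun a b => a.1 < b.1) := by
    rw [List.pairwise_append]
    refine ⟨?_, ?_, ?_⟩
    · exact (PySem.List.pairwise_lt_enumerate (xs := pvStdOrder) (s := 0)).sublist List.filter_sublist
    · unfold pvEX
      rw [List.pairwise_map]
      exact ((PySem.List.pairwise_lt_enumerate (xs := columns) (s := 0)).sublist List.filter_sublist).imp
        (fun hab => by simpa using hab)
    · intro a ha b hb
      have haE : a ∈ PySem.List.enumerate pvStdOrder 0 := (List.mem_filter.mp ha).1
      have ha1 : a.1 < (pvStdOrder.length : Int) := (pv_mem_enum_std a haE).2.2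
      unfold pvEX at hb
      rcases List.mem_map.mp hb with ⟨q, hq, hqb⟩
      have hqE : q ∈ PySem.List.enumerate columns 0 := (List.mem_filter.mp hq).1
      rcases (PySem.List.mem_enumerate_iff _ _ _).mp hqE with ⟨j, hj, hqj⟩
      have : 0 ≤ q.1 := by rw [hqj]; simp
      rw [← hqb]
      simp only
      omega
  have hsorted : PySem.List.sorted
      (List.foldl (pvAltStep (pvStdOrder.length : Int)) (PySem.Set.empty, [])
        (PySem.List.enumerate columns 0)).2 (fun t : Int × String => t.1) false
      = pvSP columns PySem.Set.empty ++ pvEX (PySem.List.enumerate columns 0) :=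
    PySem.List.sorted_eq_of_perm_of_pairwise_lt _ _ _ hperm.symm hpair
  rw [hsorted]
  rw [List.map_append]
  have hSP0 : (pvSP columns PySem.Set.empty).map (fun t => t.2)
      = pvStdOrder.filter (fun col => columns.contains col) := by
    unfold pvSP
    have hpred : (fun p : Int × String => columns.contains p.2 && !(PySem.Set.contains PySem.Set.empty p.2))
        = fun p : Int × String => columns.contains p.2 := by
      funext p; simp [PySem.Set.empty]
    rw [hpred, pv_map_snd_filter]
  have hEX0 : (pvEX (PySem.List.enumerate columns 0)).map (fun t => t.2)
      = columns.filter (fun col => !(pvStdOrder.contains col)) := by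
    unfold pvEX
    rw [List.map_map]
    have : ((fun t : Int × String => t.2) ∘ fun p : Int × String => ((pvStdOrder.length : Int) + p.1, p.2))
        = fun p : Int × String => p.2 := rfl
    rw [this]
    exact pv_map_snd_filter (fun col => !(pvStdOrder.contains col)) columns 0
  rw [hSP0, hEX0]
  congr 1
  apply List.filter_congr
  intro c hc
  have hcc : columns.contains c = true := by simpa using hc
  by_cases hs : c ∈ pvStdOrder
  · have h1 : c ∈ pvStdOrder.filter (fun col => columns.contains col) :=
      List.mem_filter.mpr ⟨hs, hcc⟩
    have h2 : (pvStdOrder.filter (fun col => columns.contains col)).contains c = true := by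
      simpa using h1
    have h3 : pvStdOrder.contains c = true := by simpa using hs
    rw [h2, h3]
  · have h1 : c ∉ pvStdOrder.filter (fun col => columns.contains col) :=
      fun h => hs (List.mem_filter.mp h).1
    have h2 : (pvStdOrder.filter (fun col => columns.contains col)).contains c = false := by
      simpa using h1
    have h3 : pvStdOrder.contains c = false := by simpa using hs
    rw [h2, h3]
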